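-- pv_equiv track=rewrite | github.com/thilak15/DSA | Greedy/1141-how-many-apples-can-you-put-into-the-basket/how-many-apples-can-you-put-into-the-basket.py | maxNumberOfApples
-- ===== SOURCE A (Python) =====
-- from typing import List
--
-- def maxNumberOfApples(weight: List[int]) -> int:
--     weight.sort()
--     s = 0
--     i = 0
--     while i < len(weight):
--         s += weight[i]
--         if s > 5000:
--             return i
--         i += 1
--     return i
-- ===== SOURCE B (Python) =====
-- from typing import List
-- import bisect
-- from itertools import accumulate
--
-- def maxNumberOfApples(weight: List[int]) -> int:
--     weight.sort()
--     prefix = list(accumulate(weight))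
--     return bisect.bisect_right(prefix, 5000)
-- ===== Notes on version B (the rewrite author's own statement) =====
-- stated objective: idiomatic
-- what changed: Replaces the accumulating while-loop with an early return by building the prefix-sum table (itertools.accumulate) and binary-searching (bisect_right) for how many prefix sums stay at or below 5000; the in-place sort is kept.
import Mathlib
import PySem

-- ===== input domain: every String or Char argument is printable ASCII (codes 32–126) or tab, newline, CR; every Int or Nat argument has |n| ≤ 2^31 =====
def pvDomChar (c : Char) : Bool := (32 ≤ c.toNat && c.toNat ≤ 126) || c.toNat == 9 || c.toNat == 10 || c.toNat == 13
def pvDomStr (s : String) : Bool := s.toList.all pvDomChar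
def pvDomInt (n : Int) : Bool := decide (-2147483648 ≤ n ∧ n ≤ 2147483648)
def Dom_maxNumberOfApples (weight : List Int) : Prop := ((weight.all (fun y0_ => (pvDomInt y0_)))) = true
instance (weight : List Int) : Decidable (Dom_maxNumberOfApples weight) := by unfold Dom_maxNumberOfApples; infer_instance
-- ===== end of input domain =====

-- B replaces A's accumulating while-loop (early return on crossing 5000) by a prefix-sum table
-- plus bisect_right; both sort the caller's list in place, and the proved equivalence is about
-- the return value.

-- ===== PORT A =====
-- A's while loop: index i, running sum s over the sorted list
def pvAGo (w : List Int) (s : Int) (i : Nat) : Int :=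
  if h : i < w.length then
    let s' := s + w[i]
    if s' > 5000 then (i : Int) else pvAGo w s' (i + 1)
  else (i : Int)
termination_by w.length - i

def maxNumberOfApples (weight : List Int) : Int :=
  let w := PySem.List.sorted weight (fun x => x)   -- weight.sort()
  pvAGo w 0 0

-- ===== PORT B =====
-- itertools.accumulate(w): the list of running sums
def pvAccum (s : Int) : List Int → List Int
  | [] => []
  | x :: xs => (s + x) :: pvAccum (s + x) xs

def maxNumberOfApples_alt (weight : List Int) : Int :=
  let w := PySem.List.sorted weight (fun x => x)   -- weight.sort()
  let pfx := pvAccum 0 w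
  (PySem.List.bisectRight pfx 5000 : Int)

-- ===== PRECONDITION & SPEC =====
def Spec_maxNumberOfApples (weight : List Int) (out : Int) : Prop := out = maxNumberOfApples_alt weight
instance (weight : List Int) (out : Int) : Decidable (Spec_maxNumberOfApples weight out) := by unfold Spec_maxNumberOfApples; infer_instance

-- ===== CLAIM (what is proved, stated in full; the proofs are below) =====
def Claim_equal_maxNumberOfApples : Prop := ∀ (weight : List Int), Dom_maxNumberOfApples weight → Spec_maxNumberOfApples weight (maxNumberOfApples weight)

-- ===== LEMMAS AND PROOFS =====

theorem pvAccum_length (s : Int) (l : List Int) : (pvAccum s l).length = l.length := by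
  induction l generalizing s with
  | nil => rfl
  | cons x xs ih => simp [pvAccum, ih]

theorem pvAccum_getD (l : List Int) (s : Int) (j : Nat) (hj : j < l.length) :
    (pvAccum s l).getD j 0 = s + (l.take (j + 1)).sum := by
  induction l generalizing s j with
  | nil => simp at hj
  | cons x xs ih =>
    cases j with
    | zero => simp [pvAccum]
    | succ j =>
      simp only [pvAccum, List.getD_cons_succ, List.take_succ_cons, List.sum_cons]
      rw [ih (s + x) j (by simpa using hj)]
      ring

theorem pv_sum_nonpos (l : List Int) (h : ∀ x ∈ l, x ≤ 0) : l.sum ≤ 0 := by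
  induction l with
  | nil => simp
  | cons x xs ih =>
    simp only [List.sum_cons]
    have := h x (by simp)
    have := ih (fun y hy => h y (by simp [hy]))
    omega

-- one step of the partition property: crossing 5000 is permanent in the prefix sums of a sorted list
theorem pv_step (w : List Int) (hw : w.Pairwise (fun a b => a ≤ b)) (j : Nat)
    (hj : j + 1 < w.length) (h : 5000 < (pvAccum 0 w).getD j 0) :
    5000 < (pvAccum 0 w).getD (j + 1) 0 := by
  rw [pvAccum_getD w 0 j (by omega)] at h
  rw [pvAccum_getD w 0 (j + 1) hj]
  rw [List.sum_take_succ w (j + 1) hj]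
  by_cases hn : 0 ≤ w[j + 1]
  · omega
  · exfalso
    have hall : ∀ x ∈ w.take (j + 1), x ≤ 0 := by
      intro x hx
      rw [List.mem_iff_getElem] at hx
      obtain ⟨k, hk, rfl⟩ := hx
      rw [List.getElem_take]
      have hk' : k < j + 1 := by simp at hk; omega
      have := (List.pairwise_iff_getElem.mp hw) k (j + 1) (by omega) hj hk'
      omega
    have := pv_sum_nonpos _ hall
    omega

-- in the prefix-sum list of a sorted list, the entries > 5000 form a suffix
theorem pv_partitioned (w : List Int) (hw : w.Pairwise (fun a b => a ≤ b)) :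
    ∀ i j, i ≤ j → j < w.length → 5000 < (pvAccum 0 w).getD i 0 → 5000 < (pvAccum 0 w).getD j 0 := by
  intro i j
  induction j with
  | zero =>
    intro hij hj hi
    have : i = 0 := by omega
    subst this; exact hi
  | succ j ihj =>
    intro hij hj hi
    rcases Nat.lt_or_ge i (j + 1) with hlt | hge
    · exact pv_step w hw j hj (ihj (by omega) (by omega) hi)
    · have : i = j + 1 := by omega
      subst this; exact hi

-- bisect_right's loop computes findIdx (x < ·) on any partitioned list
theorem pv_bisect_loop (a : List Int) (x : Int)
    (hp : ∀ i j, i ≤ j → j < a.length → x < a.getD i 0 → x < a.getD j 0) :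
    ∀ fuel lo hi, lo ≤ a.findIdx (fun v => x < v) → a.findIdx (fun v => x < v) ≤ hi →
      hi ≤ a.length → hi - lo ≤ fuel →
      PySem.List.bisectRightLoop a x fuel lo hi = a.findIdx (fun v => x < v) := by
  intro fuel
  induction fuel with
  | zero =>
    intro lo hi hlo hhi _ hf
    simp only [PySem.List.bisectRightLoop]
    omega
  | succ fuel ih =>
    intro lo hi hlo hhi hlen hf
    by_cases hlh : lo < hi
    · have hmid : (lo + hi) / 2 < a.length := by omega
      have hget : a[(lo + hi) / 2]? = some (a[(lo + hi) / 2]'hmid) :=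
        List.getElem?_eq_getElem hmid
      simp only [PySem.List.bisectRightLoop, if_pos hlh, hget]
      by_cases hc : x < a[(lo + hi) / 2]'hmid
      · rw [if_pos hc]
        have hF : a.findIdx (fun v => x < v) ≤ (lo + hi) / 2 := by
          by_contra hcon
          push Not at hcon
          have := List.not_of_lt_findIdx (xs := a) (p := fun v => decide (x < v)) hcon
          simp at this
          exact absurd hc (by simpa using this)
        exact ih lo ((lo + hi) / 2) hlo hF (by omega) (by omega)
      · rw [if_neg hc]
        have hF : (lo + hi) / 2 < a.findIdx (fun v => x < v) := by
          by_contra hcon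
          push Not at hcon
          have hFlen : a.findIdx (fun v => x < v) < a.length := by omega
          have h1 : x < a[a.findIdx (fun v => x < v)]'hFlen := by
            have := List.findIdx_getElem (xs := a) (p := fun v => decide (x < v)) (w := hFlen)
            simpa using this
          have h2 := hp (a.findIdx (fun v => x < v)) ((lo + hi) / 2) hcon hmid
            (by rwa [List.getD_eq_getElem _ _ hFlen])
          rw [List.getD_eq_getElem _ _ hmid] at h2
          exact hc h2
        exact ih ((lo + hi) / 2 + 1) hi hF hhi hlen (by omega)
    · simp only [PySem.List.bisectRightLoop, if_neg hlh]
      omega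

-- A's loop computes findIdx (5000 < ·) on the prefix-sum list
theorem pvAGo_eq (w : List Int) (s : Int) (i : Nat) :
    pvAGo w s i = (i : Int) + ((pvAccum s (w.drop i)).findIdx (fun v => 5000 < v) : Int) := by
  induction s, i using pvAGo.induct w with
  | case1 s i h s' hgt =>
    rw [pvAGo]
    simp only [dif_pos h]
    rw [if_pos (by exact hgt)]
    rw [← List.getElem_cons_drop h]
    simp only [pvAccum, List.findIdx_cons]
    have : (decide (5000 < s + w[i])) = true := by simpa using hgt
    simp [this]
  | case2 s i h s' hle ih =>
    rw [pvAGo]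
    simp only [dif_pos h]
    rw [if_neg (by exact hle)]
    rw [ih]
    rw [← List.getElem_cons_drop h]
    simp only [pvAccum, List.findIdx_cons]
    have : (decide (5000 < s + w[i])) = false := by simpa using hle
    simp [this]
    ring
  | case3 s i h =>
    rw [pvAGo]
    simp only [dif_neg h]
    rw [List.drop_of_length_le (by omega)]
    simp [pvAccum]

theorem maxNumberOfApples_eq (weight : List Int) :
    maxNumberOfApples weight = maxNumberOfApples_alt weight := by
  unfold maxNumberOfApples maxNumberOfApples_alt
  set w := PySem.List.sorted weight (fun x => x) with hwdef
  have hw : w.Pairwise (fun a b => a ≤ b) := PySem.List.sorted_pairwise weight (fun x => x)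
  have hA := pvAGo_eq w 0 0
  rw [List.drop_zero] at hA
  have hB : PySem.List.bisectRight (pvAccum 0 w) 5000
      = (pvAccum 0 w).findIdx (fun v => (5000 : Int) < v) := by
    have hp : ∀ i j, i ≤ j → j < (pvAccum 0 w).length →
        (5000 : Int) < (pvAccum 0 w).getD i 0 → (5000 : Int) < (pvAccum 0 w).getD j 0 := by
      intro i j hij hj
      exact pv_partitioned w hw i j hij (by rwa [pvAccum_length] at hj)
    exact pv_bisect_loop (pvAccum 0 w) 5000 hp (pvAccum 0 w).length 0 (pvAccum 0 w).length
      (by omega) List.findIdx_le_length le_rfl (by omega)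
  simp only [hA, hB]
  omega

-- ===== VERDICT (by name: the statement is the Claim_ definition above) =====
theorem maxNumberOfApples_spec : Claim_equal_maxNumberOfApples := by
  intro weight _
  unfold Spec_maxNumberOfApples
  exact maxNumberOfApples_eq weight
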